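-- pv_equiv track=rewrite | github.com/Ehsan-U/E-tribunalbcs-Spider | latest_judi_spider.py | find_materia
-- ===== SOURCE A (Python) =====
-- def find_materia(link_text):
--     link_text = link_text.lower()
--     if link_text == "Tercera Sala Unitaria Civil y de Justicia Administrativa (Materia Administrativa)".lower():
--         materia = 'administrativa'
--         return materia.upper()
--     laboral = ['laboral']
--     civil = ['mercantil', 'civil', 'materia civil', 'civil y familiar']
--     familiar = ['familiar', 'consignaciones']
--     penal = ['penal', 'adolescentes', 'sanciones']
--     admin = ['materia administrativa']
--     laboral = [l for l in laboral if l in link_text]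
--     civil = [c for c in civil if c in link_text]
--     familiar = [f for f in familiar if f in link_text]
--     penal = [p for p in penal if p in link_text]
--     admin = [ad for ad in admin if ad in link_text]
--     if laboral:
--         materia = 'laboral'
--     elif civil:
--         materia = 'civil'
--     elif familiar:
--         materia = 'familiar'
--     elif penal:
--         materia = 'penal'
--     elif admin:
--         materia = 'administrativa'
--     return materia.upper()
-- ===== SOURCE B (Python) =====
-- # One flat priority-ordered keyword table scanned once; redundant keywords
-- # ('materia civil', 'civil y familiar' -- both subsumed by 'civil') dropped.
-- _KEYWORDS = [
--     ("laboral", "LABORAL"),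
--     ("mercantil", "CIVIL"),
--     ("civil", "CIVIL"),
--     ("familiar", "FAMILIAR"),
--     ("consignaciones", "FAMILIAR"),
--     ("penal", "PENAL"),
--     ("adolescentes", "PENAL"),
--     ("sanciones", "PENAL"),
--     ("materia administrativa", "ADMINISTRATIVA"),
-- ]
--
-- def find_materia(link_text):
--     t = link_text.lower()
--     if t == "tercera sala unitaria civil y de justicia administrativa (materia administrativa)":
--         return "ADMINISTRATIVA"
--     for kw, cat in _KEYWORDS:
--         if kw in t:
--             return cat
--     raise ValueError("unknown materia: %r" % link_text)
-- ===== Notes on version B (the rewrite author's own statement) =====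
-- stated objective: simpler
-- what changed: Replaces the five per-category filter passes plus if/elif chain by a single flat priority-ordered (keyword, category) table scanned once, dropping the two multi-word keywords subsumed by a shorter keyword of the same category.
import Mathlib
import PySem

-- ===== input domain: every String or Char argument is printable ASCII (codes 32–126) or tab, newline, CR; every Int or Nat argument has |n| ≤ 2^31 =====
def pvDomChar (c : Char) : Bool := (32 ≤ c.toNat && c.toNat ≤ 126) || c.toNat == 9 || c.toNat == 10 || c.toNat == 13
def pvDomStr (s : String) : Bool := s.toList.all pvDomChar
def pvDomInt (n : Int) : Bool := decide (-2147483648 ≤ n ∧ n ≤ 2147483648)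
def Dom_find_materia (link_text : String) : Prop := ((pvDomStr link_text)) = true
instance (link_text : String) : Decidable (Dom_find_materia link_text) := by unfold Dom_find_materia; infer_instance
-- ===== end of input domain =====

-- B replaces A's five filter passes + if/elif chain by one flat priority-ordered keyword table scanned once (objective: simpler).
-- Where A raises UnboundLocalError (no keyword matches), B raises ValueError; both excluded by Pre_.

-- ===== PORT A =====
def find_materia (link_text : String) : String :=
  let link_text := PySem.Str.lower link_text
  if link_text = PySem.Str.lower "Tercera Sala Unitaria Civil y de Justicia Administrativa (Materia Administrativa)" then
    PySem.Str.upper "administrativa"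
  else
    let laboral := ["laboral"]
    let civil := ["mercantil", "civil", "materia civil", "civil y familiar"]
    let familiar := ["familiar", "consignaciones"]
    let penal := ["penal", "adolescentes", "sanciones"]
    let admin := ["materia administrativa"]
    let laboral := laboral.filter (fun l => PySem.Str.isIn l link_text)
    let civil := civil.filter (fun c => PySem.Str.isIn c link_text)
    let familiar := familiar.filter (fun f => PySem.Str.isIn f link_text)
    let penal := penal.filter (fun p => PySem.Str.isIn p link_text)
    let admin := admin.filter (fun ad => PySem.Str.isIn ad link_text)
    if laboral ≠ [] then PySem.Str.upper "laboral"
    else if civil ≠ [] then PySem.Str.upper "civil"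
    else if familiar ≠ [] then PySem.Str.upper "familiar"
    else if penal ≠ [] then PySem.Str.upper "penal"
    else if admin ≠ [] then PySem.Str.upper "administrativa"
    else ""  -- Python raises UnboundLocalError here; these inputs are excluded by Pre_

-- ===== PORT B =====
def pvKeywords : List (String × String) :=
  [("laboral", "LABORAL"),
   ("mercantil", "CIVIL"),
   ("civil", "CIVIL"),
   ("familiar", "FAMILIAR"),
   ("consignaciones", "FAMILIAR"),
   ("penal", "PENAL"),
   ("adolescentes", "PENAL"),
   ("sanciones", "PENAL"),
   ("materia administrativa", "ADMINISTRATIVA")]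

def find_materia_alt (link_text : String) : String :=
  let t := PySem.Str.lower link_text
  if t = "tercera sala unitaria civil y de justicia administrativa (materia administrativa)" then
    "ADMINISTRATIVA"
  else
    match pvKeywords.find? (fun kc => PySem.Str.isIn kc.1 t) with
    | some kc => kc.2
    | none => ""  -- Python B raises ValueError here; these inputs are excluded by Pre_

-- ===== PRECONDITION & SPEC =====
-- Pre_ excludes exactly the inputs on which A raises UnboundLocalError (lowercased text is neither the
-- special sala string nor contains any of the nine keywords); B raises ValueError there.
def Pre_find_materia (link_text : String) : Prop :=
  PySem.Str.lower link_text
      = "tercera sala unitaria civil y de justicia administrativa (materia administrativa)" ∨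
  (["laboral", "mercantil", "civil", "familiar", "consignaciones", "penal",
    "adolescentes", "sanciones", "materia administrativa"].any
      (fun k => PySem.Str.isIn k (PySem.Str.lower link_text))) = true
instance (link_text : String) : Decidable (Pre_find_materia link_text) := by
  unfold Pre_find_materia; infer_instance

def pvWitness_find_materia : String := "Sala Penal"

def Spec_find_materia (link_text : String) (out : String) : Prop := out = find_materia_alt link_text
instance (link_text : String) (out : String) : Decidable (Spec_find_materia link_text out) := by
  unfold Spec_find_materia; infer_instance

-- ===== CLAIM (what is proved, stated in full; the proofs are below) =====
def Claim_equal_find_materia : Prop := ∀ (link_text : String), Dom_find_materia link_text → Pre_find_materia link_text → Spec_find_materia link_text (find_materia link_text)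

-- ===== LEMMAS AND PROOFS =====

-- substring transitivity facts specific to the keyword lists
theorem pv_civil_of_materia_civil (t : String)
    (h : PySem.Str.isIn "materia civil" t = true) : PySem.Str.isIn "civil" t = true := by
  simp only [PySem.Str.isIn_iff_infix] at *
  exact List.IsInfix.trans (by decide) h

theorem pv_civil_of_cyf (t : String)
    (h : PySem.Str.isIn "civil y familiar" t = true) : PySem.Str.isIn "civil" t = true := by
  simp only [PySem.Str.isIn_iff_infix] at *
  exact List.IsInfix.trans (by decide) h

-- ===== VERDICT (by name: the statement is the Claim_ definition above) =====
theorem find_materia_spec : Claim_equal_find_materia := by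
  intro link_text _ hpre
  unfold Pre_find_materia at hpre
  unfold Spec_find_materia find_materia find_materia_alt pvKeywords
  rw [show PySem.Str.lower "Tercera Sala Unitaria Civil y de Justicia Administrativa (Materia Administrativa)"
        = "tercera sala unitaria civil y de justicia administrativa (materia administrativa)" from by decide]
  generalize PySem.Str.lower link_text = t at hpre ⊢
  by_cases hs : t = "tercera sala unitaria civil y de justicia administrativa (materia administrativa)"
  · simp only [if_pos hs]; decide
  · simp only [if_neg hs]
    by_cases h1 : PySem.Str.isIn "laboral" t = true
    · simp_all <;> decide
    · by_cases h3 : PySem.Str.isIn "civil" t = true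
      · by_cases h2 : PySem.Str.isIn "mercantil" t = true <;> simp_all <;> decide
      · have h4 : PySem.Str.isIn "materia civil" t = false := by
          by_contra h; exact h3 (pv_civil_of_materia_civil t (by simpa using h))
        have h5 : PySem.Str.isIn "civil y familiar" t = false := by
          by_contra h; exact h3 (pv_civil_of_cyf t (by simpa using h))
        by_cases h2 : PySem.Str.isIn "mercantil" t = true
        · simp_all <;> decide
        · by_cases h6 : PySem.Str.isIn "familiar" t = true
          · simp_all <;> decide
          · by_cases h7 : PySem.Str.isIn "consignaciones" t = true
            · simp_all <;> decide
            · by_cases h8 : PySem.Str.isIn "penal" t = true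
              · simp_all <;> decide
              · by_cases h9 : PySem.Str.isIn "adolescentes" t = true
                · simp_all <;> decide
                · by_cases h10 : PySem.Str.isIn "sanciones" t = true
                  · simp_all <;> decide
                  · by_cases h11 : PySem.Str.isIn "materia administrativa" t = true
                    · simp_all <;> decide
                    · exfalso; simp_all
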